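-- pv_equiv track=rewrite | github.com/RayLei/leetcode | test.py | getSubstringCount
-- ===== SOURCE A (Python) =====
-- def getSubstringCount(s):
--     # Write your code here
--     l = r = 0
--     res = 0
--     cnt = {}
--
--     while r < len(s):
--         cnt[s[r]] = 1 + cnt.get(s[r], 0)
--
--         if r == len(s)-1 and cnt.get('0', 0) != cnt.get('1', 0):
--             cnt[s[l]] -= 1
--             l += 1
--             r = l
--             cnt = {}
--         elif max(cnt.values()) > 0 and cnt.get('0', 0) == cnt.get('1', 0):
--             res += 1
--             l += 1
--             r = l
--             cnt = {}
--         else: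
--             r += 1
--     return res
-- ===== SOURCE B (Python) =====
-- def getSubstringCount(s):
--     # O(n): prefix balance (#'1' - #'0'); start l is counted iff its prefix
--     # balance reappears at some later prefix boundary; scan right-to-left
--     # with a set of balances seen so far.
--     bal = [0]
--     b = 0
--     for c in s:
--         b += 1 if c == '1' else (-1 if c == '0' else 0)
--         bal.append(b)
--     res = 0
--     seen = set()
--     for l in reversed(range(len(s))):
--         seen.add(bal[l + 1])
--         if bal[l] in seen:
--             res += 1
--     return res
-- ===== Notes on version B (the rewrite author's own statement) =====
-- stated objective: faster
-- what changed: A rescans the string from every start index with a fresh character counter until a balanced stretch is found; B makes one pass computing prefix balances (#'1' - #'0') and counts, scanning right-to-left with a set of balances seen so far, the starts whose prefix balance reappears at a later boundary.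
import Mathlib
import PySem

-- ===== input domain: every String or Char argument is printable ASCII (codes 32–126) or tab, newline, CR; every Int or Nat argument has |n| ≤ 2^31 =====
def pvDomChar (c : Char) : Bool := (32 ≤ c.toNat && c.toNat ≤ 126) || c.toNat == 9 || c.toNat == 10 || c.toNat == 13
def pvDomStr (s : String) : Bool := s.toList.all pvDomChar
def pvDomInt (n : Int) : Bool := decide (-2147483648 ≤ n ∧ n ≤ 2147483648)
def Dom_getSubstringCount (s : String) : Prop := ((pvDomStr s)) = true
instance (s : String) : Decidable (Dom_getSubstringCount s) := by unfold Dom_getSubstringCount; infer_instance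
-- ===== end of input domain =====

-- B replaces A's restart-from-every-start sliding scan (O(n^2)) by a single
-- O(n) prefix-balance pass with a set of balances seen to the right.

-- B replaces A's restart-from-every-start sliding scan by a single prefix-balance
-- pass with a set of the balances seen to the right (objective: faster).

-- ===== PORT A =====
-- literal port of A's while loop; state (l, r, cnt, res), one recursive call per
-- iteration; `fuel` only makes the recursion structural — (len+1)*(len+2) bounds the
-- number of iterations (proved below), so the 0-fuel arm is never reached
def loopA (cs : List Char) (l r fuel : Nat) (cnt : PySem.Dict Char Int) (res : Int) : Int :=
  match fuel with
  | 0 => res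
  | fuel + 1 =>
    if h : r < cs.length then
      let c := cs[r]
      let cnt1 := cnt.insert c (1 + cnt.getD c 0)
      if r = cs.length - 1 ∧ ¬ (cnt1.getD '0' 0 = cnt1.getD '1' 0) then
        -- Python does `cnt[s[l]] -= 1` and then rebinds cnt = {} — the decremented dict is dead;
        -- s[l] is in range and a present key for every reachable state (l ≤ r < len), so getD is exact
        let cl := cs.getD l c
        let _cnt2 := cnt1.insert cl (cnt1.getD cl 0 - 1)
        loopA cs (l+1) (l+1) fuel PySem.Dict.empty res
      else if 0 < ((PySem.List.max? cnt1.values (fun y => y)).getD 0) ∧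
                cnt1.getD '0' 0 = cnt1.getD '1' 0 then
        -- cnt1.values is nonempty here (s[r] was just inserted), so Python's max() never raises
        loopA cs (l+1) (l+1) fuel PySem.Dict.empty (res + 1)
      else
        loopA cs l (r+1) fuel cnt1 res
    else res

def getSubstringCount (s : String) : Int :=
  loopA s.toList 0 0 ((s.toList.length + 1) * (s.toList.length + 2)) PySem.Dict.empty 0

-- ===== PORT B =====
-- Source B's first loop: append the running balance to bal
def balStep (p : List Int × Int) (c : Char) : List Int × Int :=
  let b := p.2 + (if c = '1' then (1 : Int) else if c = '0' then -1 else 0)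
  (p.1 ++ [b], b)

def getSubstringCount_alt (s : String) : Int :=
  let cs := s.toList
  let bal := (cs.foldl balStep ([0], 0)).1
  -- Source B's second loop over reversed(range(len(s))); bal[l], bal[l+1] are always in
  -- range (bal has length len(s)+1), so getD's default is never used
  (((List.range cs.length).reverse).foldl
    (fun (p : PySem.Set Int × Int) l =>
      let seen := PySem.Set.add p.1 (bal.getD (l+1) 0)
      (seen, if bal.getD l 0 ∈ seen then p.2 + 1 else p.2))
    (PySem.Set.empty, 0)).2

-- ===== PRECONDITION & SPEC =====
def Spec_getSubstringCount (s : String) (out : Int) : Prop := out = getSubstringCount_alt s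
instance (s : String) (out : Int) : Decidable (Spec_getSubstringCount s out) := by unfold Spec_getSubstringCount; infer_instance

-- ===== CLAIM (what is proved, stated in full; the proofs are below) =====
def Claim_equal_getSubstringCount : Prop := ∀ (s : String), Dom_getSubstringCount s → Spec_getSubstringCount s (getSubstringCount s)

-- ===== LEMMAS AND PROOFS =====

-- per-character contribution to the balance (#'1' − #'0')
def dchar (c : Char) : Int := if c = '1' then 1 else if c = '0' then -1 else 0

-- balance of the length-k prefix
def bal0 (cs : List Char) (k : Nat) : Int := ((cs.take k).map dchar).sum

-- the common specification: start l sees a later prefix boundary with the same balance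
def goodB (cs : List Char) (l : Nat) : Bool :=
  (List.range' (l+1) (cs.length - l)).any (fun k => bal0 cs k == bal0 cs l)

-- goodB restricted to candidate boundaries > r (A's scan is at position r)
def goodFrom (cs : List Char) (l r : Nat) : Bool :=
  (List.range' (r+1) (cs.length - r)).any (fun k => bal0 cs k == bal0 cs l)

-- count of good starts in [l, length)
def Fc (cs : List Char) (l : Nat) : Int :=
  if l < cs.length then (if goodB cs l then 1 else 0) + Fc cs (l+1) else 0
termination_by cs.length - l

-- count of good starts in [0, m)
def Gc (cs : List Char) (m : Nat) : Int := (((List.range m).filter (goodB cs)).length : Int)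

-- the balances Source B's first loop appends after the initial 0
def scanBal (b : Int) (cs : List Char) : List Int :=
  match cs with
  | [] => []
  | c :: t => (b + dchar c) :: scanBal (b + dchar c) t

theorem sum_dchar (xs : List Char) :
    (xs.map dchar).sum = (xs.count '1' : Int) - (xs.count '0' : Int) := by
  induction xs with
  | nil => simp
  | cons c t ih =>
    simp only [List.map_cons, List.sum_cons, List.count_cons, ih, dchar]
    split_ifs with h1 h0 <;> simp_all <;> omega

theorem foldl_balStep (cs : List Char) (pfx : List Int) (b : Int) :
    (cs.foldl balStep (pfx, b)).1 = pfx ++ scanBal b cs := by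
  induction cs generalizing pfx b with
  | nil => simp [scanBal]
  | cons c t ih =>
    simp only [List.foldl_cons, balStep, scanBal, dchar]
    rw [ih]; simp

theorem scanBal_eq (cs : List Char) (b : Int) :
    scanBal b cs = (List.range cs.length).map (fun k => b + bal0 cs (k+1)) := by
  induction cs generalizing b with
  | nil => simp [scanBal]
  | cons c t ih =>
    rw [scanBal, List.length_cons, List.range_succ_eq_map, List.map_cons, ih]
    rw [List.cons_eq_cons]
    refine ⟨by simp [bal0], ?_⟩
    simp only [List.map_map]
    apply List.map_congr_left
    intro k _
    simp [Function.comp, bal0, add_assoc]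

theorem bal_eq (cs : List Char) :
    (cs.foldl balStep ([0], 0)).1 = (List.range (cs.length + 1)).map (bal0 cs) := by
  rw [foldl_balStep, scanBal_eq, List.range_succ_eq_map, List.map_cons]
  rw [List.singleton_append, List.cons_eq_cons]
  refine ⟨by simp [bal0], ?_⟩
  simp only [List.map_map]; apply List.map_congr_left; intro k _; simp [Function.comp, bal0]

theorem bal0_split (cs : List Char) (l r : Nat) (hlr : l ≤ r) (_hr : r < cs.length) :
    (bal0 cs (r+1) = bal0 cs l ↔
      (((cs.drop l).take (r+1-l)).count '0' : Int) = ((cs.drop l).take (r+1-l)).count '1') := by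
  have hsplit : cs.take (r+1) = cs.take l ++ (cs.drop l).take (r+1-l) := by
    rw [← List.take_add]; congr 1; omega
  have : bal0 cs (r+1) = bal0 cs l + (((cs.drop l).take (r+1-l)).map dchar).sum := by
    rw [bal0, hsplit, List.map_append, List.sum_append]; rfl
  rw [this, sum_dchar]
  constructor <;> (intro h; omega)

theorem goodFrom_self (cs : List Char) (l : Nat) : goodFrom cs l l = goodB cs l := rfl

theorem goodFrom_step (cs : List Char) (l r : Nat) (hr : r < cs.length)
    (hne : bal0 cs (r+1) ≠ bal0 cs l) :
    goodFrom cs l r = goodFrom cs l (r+1) := by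
  rw [goodFrom, goodFrom]
  have h1 : cs.length - r = (cs.length - (r+1)) + 1 := by omega
  rw [h1, List.range'_succ, List.any_cons]
  simp [hne]

theorem Fc_eq_filter (cs : List Char) (l : Nat) :
    Fc cs l = (((List.range' l (cs.length - l)).filter (goodB cs)).length : Int) := by
  by_cases h : l < cs.length
  · have h1 : cs.length - l = (cs.length - (l+1)) + 1 := by omega
    rw [Fc, if_pos h, h1, List.range'_succ, List.filter_cons, Fc_eq_filter cs (l+1)]
    split <;> simp <;> omega
  · rw [Fc, if_neg h]
    have : cs.length - l = 0 := by omega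
    simp [this]
termination_by cs.length - l

theorem goodB_iff (cs : List Char) (l : Nat) :
    goodB cs l = true ↔ ∃ k, l + 1 ≤ k ∧ k ≤ cs.length ∧ bal0 cs k = bal0 cs l := by
  rw [goodB, List.any_eq_true]
  constructor
  · rintro ⟨k, hk, he⟩
    rw [List.mem_range'_1] at hk
    exact ⟨k, hk.1, by omega, by simpa using he⟩
  · rintro ⟨k, h1, h2, he⟩
    exact ⟨k, List.mem_range'_1.mpr ⟨h1, by omega⟩, by simpa using he⟩

theorem loopB_inv (cs : List Char) (m : Nat) (hm : m ≤ cs.length)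
    (seen : PySem.Set Int) (res : Int)
    (hs : ∀ x : Int, x ∈ seen ↔ ∃ k, m + 1 ≤ k ∧ k ≤ cs.length ∧ bal0 cs k = x) :
    (((List.range m).reverse).foldl
      (fun (p : PySem.Set Int × Int) l =>
        let seen := PySem.Set.add p.1 (((List.range (cs.length + 1)).map (bal0 cs)).getD (l+1) 0)
        (seen, if ((List.range (cs.length + 1)).map (bal0 cs)).getD l 0 ∈ seen then p.2 + 1 else p.2))
      (seen, res)).2 = res + Gc cs m := by
  induction m generalizing seen res with
  | zero => simp [Gc]
  | succ m ih =>
    have hrev : (List.range (m+1)).reverse = m :: (List.range m).reverse := by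
      rw [List.range_succ]; simp
    rw [hrev, List.foldl_cons]
    have hgd1 : (((List.range (cs.length + 1)).map (bal0 cs)).getD (m+1) 0) = bal0 cs (m+1) :=
      PySem.List.getD_map_range _ _ _ _ (by omega)
    have hgd0 : (((List.range (cs.length + 1)).map (bal0 cs)).getD m 0) = bal0 cs m :=
      PySem.List.getD_map_range _ _ _ _ (by omega)
    simp only [hgd1, hgd0]
    have hs' : ∀ x : Int, x ∈ PySem.Set.add seen (bal0 cs (m+1)) ↔
        ∃ k, m + 1 ≤ k ∧ k ≤ cs.length ∧ bal0 cs k = x := by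
      intro x
      rw [PySem.Set.mem_add, hs]
      constructor
      · rintro (⟨k, h1, h2, h3⟩ | h)
        · exact ⟨k, by omega, h2, h3⟩
        · exact ⟨m+1, le_refl _, by omega, h.symm⟩
      · rintro ⟨k, h1, h2, h3⟩
        by_cases hk : k = m + 1
        · right; rw [← h3, hk]
        · left; exact ⟨k, by omega, h2, h3⟩
    have hcond : (bal0 cs m ∈ PySem.Set.add seen (bal0 cs (m+1))) ↔ goodB cs m = true := by
      rw [hs', goodB_iff]
    rw [ih (by omega) _ _ hs']
    have hG : Gc cs (m+1) = Gc cs m + (if goodB cs m then 1 else 0) := by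
      rw [Gc, Gc, List.range_succ, List.filter_append, List.length_append]
      split <;> simp_all
    rw [hG]
    split <;> rename_i hmem <;> simp [hcond] at hmem <;> simp [hmem] <;> omega

-- loop measure: decreases at every iteration of A's while loop
def muA (n l r : Nat) : Nat := (n - l) * (n + 2) + (n + 1 - r)

theorem muA_adv (n l r : Nat) (h : r < n) : muA n (l+1) (l+1) < muA n l r := by
  unfold muA
  rcases Nat.lt_or_ge l n with h' | h'
  · have e : n - l = (n - (l+1)) + 1 := by omega
    rw [e, Nat.succ_mul]
    generalize (n - (l+1)) * (n + 2) = A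
    omega
  · have e1 : n - l = 0 := by omega
    have e2 : n - (l+1) = 0 := by omega
    rw [e1, e2]
    omega

theorem muA_step (n l r : Nat) (h : r < n) : muA n l (r+1) < muA n l r := by
  unfold muA
  generalize (n - l) * (n + 2) = A
  omega

theorem loopA_stop (cs : List Char) (l r fuel : Nat) (cnt : PySem.Dict Char Int) (res : Int)
    (h : ¬ r < cs.length) : loopA cs l r fuel cnt res = res := by
  cases fuel with
  | zero => rw [loopA]
  | succ f => rw [loopA, dif_neg h]

theorem loopA_fuel_congr (cs : List Char) (f1 : Nat) : ∀ (f2 l r : Nat)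
    (cnt : PySem.Dict Char Int) (res : Int), muA cs.length l r ≤ f1 → muA cs.length l r ≤ f2 →
    loopA cs l r f1 cnt res = loopA cs l r f2 cnt res := by
  induction f1 with
  | zero =>
    intro f2 l r cnt res h1 _
    have hr : ¬ r < cs.length := by unfold muA at h1; omega
    rw [loopA_stop cs l r 0 cnt res hr, loopA_stop cs l r f2 cnt res hr]
  | succ f1 ih =>
    intro f2 l r cnt res h1 h2
    by_cases hr : r < cs.length
    · cases f2 with
      | zero => exfalso; unfold muA at h2; omega
      | succ f2 =>
        have hadv := muA_adv cs.length l r hr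
        have hstep := muA_step cs.length l r hr
        conv_lhs => rw [loopA]
        conv_rhs => rw [loopA]
        rw [dif_pos hr, dif_pos hr]
        dsimp only
        split_ifs
        · exact ih f2 (l+1) (l+1) _ _ (by omega) (by omega)
        · exact ih f2 (l+1) (l+1) _ _ (by omega) (by omega)
        · exact ih f2 l (r+1) _ _ (by omega) (by omega)
    · rw [loopA_stop cs l r _ cnt res hr, loopA_stop cs l r _ cnt res hr]

theorem loopA_inner (cs : List Char) (l r fuel : Nat) (cnt : PySem.Dict Char Int) (res : Int)
    (hlr : l ≤ r) (hr : r < cs.length) (hf : muA cs.length l r ≤ fuel)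
    (hc : ∀ x, cnt.getD x 0 = (((cs.drop l).take (r-l)).count x : Int))
    (hnd : cnt.keys.Nodup) :
    loopA cs l r fuel cnt res
      = loopA cs (l+1) (l+1) fuel PySem.Dict.empty (res + (if goodFrom cs l r then 1 else 0)) := by
  obtain ⟨f, rfl⟩ : ∃ f, fuel = f + 1 := by
    refine ⟨fuel - 1, ?_⟩
    unfold muA at hf
    omega
  have hadv := muA_adv cs.length l r hr
  have hstep := muA_step cs.length l r hr
  have hseg : (cs.drop l).take (r+1-l) = (cs.drop l).take (r-l) ++ [cs[r]] := by
    have h1 : r + 1 - l = (r - l) + 1 := by omega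
    rw [h1, List.take_add_one]
    congr 1
    rw [List.getElem?_drop]
    have h2 : l + (r - l) = r := by omega
    rw [h2, List.getElem?_eq_getElem hr]
    rfl
  set c := cs[r] with hcdef
  set cnt1 := cnt.insert c (1 + cnt.getD c 0) with hcnt1
  have hc1 : ∀ x, cnt1.getD x 0 = (((cs.drop l).take (r+1-l)).count x : Int) := by
    intro x
    rw [hseg, List.count_append]
    by_cases hx : x = c
    · subst hx
      rw [hcnt1, PySem.Dict.getD_insert_self, hc]
      push_cast; simp; omega
    · rw [hcnt1, PySem.Dict.getD_insert_of_ne cnt _ _ hx, hc]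
      simp [List.count_singleton]
      exact fun h => hx h.symm
  have hbal : (cnt1.getD '0' 0 = cnt1.getD '1' 0) ↔ bal0 cs (r+1) = bal0 cs l := by
    rw [hc1, hc1, bal0_split cs l r hlr hr]
  have hnd1 : cnt1.keys.Nodup := PySem.Dict.nodup_keys_insert _ _ _ hnd
  rw [loopA, dif_pos hr]
  by_cases hb : bal0 cs (r+1) = bal0 cs l
  · -- balanced: branch 2 fires
    have heq : cnt1.getD '0' 0 = cnt1.getD '1' 0 := hbal.mpr hb
    rw [if_neg (fun h => h.2 heq)]
    -- max(cnt1.values) > 0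
    have hvmem : cnt1.getD c 0 ∈ cnt1.values := by
      rw [PySem.Dict.values_eq_map_keys cnt1 hnd1 0]
      exact List.mem_map_of_mem ((PySem.Dict.contains_iff_mem_keys _ _).mp (PySem.Dict.contains_insert_self _ _ _))
    have hvpos : 0 < cnt1.getD c 0 := by
      rw [hc1]
      have : c ∈ (cs.drop l).take (r+1-l) := by rw [hseg]; simp
      have := List.count_pos_iff.mpr this
      omega
    obtain ⟨m, hm⟩ : ∃ m, PySem.List.max? cnt1.values (fun y => y) = some m := by
      cases hmx : PySem.List.max? cnt1.values (fun y => y) with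
      | none =>
        rw [PySem.List.max?_eq_none_iff] at hmx
        rw [hmx] at hvmem
        simp at hvmem
      | some m => exact ⟨m, rfl⟩
    have hmax : 0 < (PySem.List.max? cnt1.values (fun y => y)).getD 0 := by
      rw [hm]
      have := PySem.List.max?_isMax hm _ hvmem
      simpa using lt_of_lt_of_le hvpos this
    rw [if_pos ⟨hmax, heq⟩]
    rw [loopA_fuel_congr cs f (f+1) (l+1) (l+1) PySem.Dict.empty (res + 1) (by omega) (by omega)]
    have hgf : goodFrom cs l r = true := by
      rw [goodFrom, List.any_eq_true]
      exact ⟨r+1, List.mem_range'_1.mpr ⟨le_refl _, by omega⟩, by simpa using hb⟩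
    rw [hgf]
    norm_num
  · -- not balanced at r
    have hne : ¬ (cnt1.getD '0' 0 = cnt1.getD '1' 0) := fun h => hb (hbal.mp h)
    by_cases hend : r = cs.length - 1
    · -- end of string, unbalanced: branch 1 resets without counting
      rw [if_pos ⟨hend, hne⟩]
      rw [loopA_fuel_congr cs f (f+1) (l+1) (l+1) PySem.Dict.empty res (by omega) (by omega)]
      have hgf : goodFrom cs l r = false := by
        have hr1 : r + 1 = cs.length := by omega
        rw [goodFrom]
        have h1 : cs.length - r = 1 := by omega
        rw [h1, List.range'_one]
        simp [hb]
      rw [hgf]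
      norm_num
    · -- middle of string, unbalanced: advance r
      rw [if_neg (by rintro ⟨h1, _⟩; exact hend h1), if_neg (by rintro ⟨_, h2⟩; exact hne h2)]
      rw [loopA_inner cs l (r+1) f cnt1 res (by omega) (by omega) (by omega)
            (by simpa using hc1) hnd1]
      rw [loopA_fuel_congr cs f (f+1) (l+1) (l+1) PySem.Dict.empty _ (by omega) (by omega)]
      rw [goodFrom_step cs l r hr hb]
termination_by cs.length - r

theorem loopA_outer (cs : List Char) (l fuel : Nat) (res : Int)
    (hf : muA cs.length l l ≤ fuel) :
    loopA cs l l fuel PySem.Dict.empty res = res + Fc cs l := by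
  by_cases hl : l < cs.length
  · rw [loopA_inner cs l l fuel PySem.Dict.empty res (le_refl l) hl hf
        (by intro x; simp [PySem.Dict.getD, PySem.Dict.get?, PySem.Dict.empty])
        PySem.Dict.nodup_keys_empty]
    have hadv := muA_adv cs.length l l hl
    rw [goodFrom_self, loopA_outer cs (l+1) fuel _ (by omega)]
    conv_rhs => rw [Fc]
    rw [if_pos hl]
    ring
  · rw [loopA_stop cs l l fuel PySem.Dict.empty res hl]
    conv_rhs => rw [Fc]
    rw [if_neg hl]
    ring
termination_by cs.length - l

-- ===== VERDICT (by name: the statement is the Claim_ definition above) =====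
theorem getSubstringCount_spec : Claim_equal_getSubstringCount := by
  intro s _
  unfold Spec_getSubstringCount getSubstringCount getSubstringCount_alt
  dsimp only
  have hf : muA s.toList.length 0 0 ≤ (s.toList.length + 1) * (s.toList.length + 2) := by
    unfold muA
    have e : (s.toList.length + 1) * (s.toList.length + 2)
        = s.toList.length * (s.toList.length + 2) + (s.toList.length + 2) := by ring
    rw [Nat.sub_zero, Nat.sub_zero, e]
    generalize s.toList.length * (s.toList.length + 2) = A
    omega
  rw [loopA_outer s.toList 0 _ 0 hf, bal_eq]
  rw [loopB_inv s.toList s.toList.length le_rfl PySem.Set.empty 0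
      (by intro x; simp only [PySem.Set.empty]; constructor
          · intro h; simp at h
          · rintro ⟨k, h1, h2, _⟩; omega)]
  rw [Fc_eq_filter, Gc]
  simp [List.range_eq_range']
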